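-- pv_equiv track=rewrite | github.com/TIM2015YXH/HaveFun | handmesh_utils/utils/vis_interhand.py | get_keypoint_rgb
-- ===== SOURCE A (Python) =====
-- def get_keypoint_rgb(skeleton):
--     rgb_dict= {}
--     for joint_id in range(len(skeleton)):
--         joint_name = skeleton[joint_id]['name']
--
--         if joint_name.endswith('thumb4'):
--             rgb_dict[joint_name] = (255, 0, 0)
--         elif joint_name.endswith('thumb3'):
--             rgb_dict[joint_name] = (255, 51, 51)
--         elif joint_name.endswith('thumb2'):
--             rgb_dict[joint_name] = (255, 102, 102)
--         elif joint_name.endswith('thumb1'):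
--             rgb_dict[joint_name] = (255, 153, 153)
--         elif joint_name.endswith('thumb0'):
--             rgb_dict[joint_name] = (255, 204, 204)
--         elif joint_name.endswith('index4'):
--             rgb_dict[joint_name] = (0, 255, 0)
--         elif joint_name.endswith('index3'):
--             rgb_dict[joint_name] = (51, 255, 51)
--         elif joint_name.endswith('index2'):
--             rgb_dict[joint_name] = (102, 255, 102)
--         elif joint_name.endswith('index1'):
--             rgb_dict[joint_name] = (153, 255, 153)
--         elif joint_name.endswith('middle4'):
--             rgb_dict[joint_name] = (255, 128, 0)
--         elif joint_name.endswith('middle3'):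
--             rgb_dict[joint_name] = (255, 153, 51)
--         elif joint_name.endswith('middle2'):
--             rgb_dict[joint_name] = (255, 178, 102)
--         elif joint_name.endswith('middle1'):
--             rgb_dict[joint_name] = (255, 204, 153)
--         elif joint_name.endswith('ring4'):
--             rgb_dict[joint_name] = (0, 128, 255)
--         elif joint_name.endswith('ring3'):
--             rgb_dict[joint_name] = (51, 153, 255)
--         elif joint_name.endswith('ring2'):
--             rgb_dict[joint_name] = (102, 178, 255)
--         elif joint_name.endswith('ring1'):
--             rgb_dict[joint_name] = (153, 204, 255)
--         elif joint_name.endswith('pinky4'):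
--             rgb_dict[joint_name] = (255, 0, 255)
--         elif joint_name.endswith('pinky3'):
--             rgb_dict[joint_name] = (255, 51, 255)
--         elif joint_name.endswith('pinky2'):
--             rgb_dict[joint_name] = (255, 102, 255)
--         elif joint_name.endswith('pinky1'):
--             rgb_dict[joint_name] = (255, 153, 255)
--         elif joint_name.startswith('l'):
--             rgb_dict[joint_name] = (0, 0, 255)
--         elif joint_name.startswith('r'):
--             rgb_dict[joint_name] = (255, 0, 0)
--         else:
--             rgb_dict[joint_name] = (230, 230, 0)
--
--     return rgb_dict
-- ===== SOURCE B (Python) =====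
-- def _suffix_color(name):
--     """Color for a name ending in '<finger><digit>': parse the trailing digit,
--     find the unique finger word before it (finger words have distinct last
--     letters), and compute the shade arithmetically from the digit."""
--     if not (name and '0' <= name[-1] <= '4'):
--         return None
--     t = 4 - int(name[-1])
--     stem = name[:-1]
--     for finger in ('thumb', 'index', 'middle', 'ring', 'pinky'):
--         if stem.endswith(finger) and (finger == 'thumb' or t < 4):
--             s = 51 * t
--             g = 128 + 25 * t + t // 3
--             return {'thumb': (255, s, s),
--                     'index': (s, 255, s),
--                     'middle': (255, g, s),
--                     'ring': (s, g, 255),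
--                     'pinky': (255, s, 255)}[finger]
--     return None
--
--
-- def get_keypoint_rgb(skeleton):
--     rgb_dict = {}
--     for joint in skeleton:
--         name = joint['name']
--         color = _suffix_color(name)
--         if color is None:
--             if name.startswith('l'):
--                 color = (0, 0, 255)
--             elif name.startswith('r'):
--                 color = (255, 0, 0)
--             else:
--                 color = (230, 230, 0)
--         rgb_dict[name] = color
--     return rgb_dict
-- ===== Notes on version B (the rewrite author's own statement) =====
-- stated objective: alternative
-- what changed: Instead of testing 21 finger+digit suffixes with an if/elif ladder, B parses the trailing digit off the name, matches the finger word before it (the five finger words have distinct last letters), and computes the RGB shade arithmetically from the digit (s=51*t, g=128+25*t+t//3).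
import Mathlib
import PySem

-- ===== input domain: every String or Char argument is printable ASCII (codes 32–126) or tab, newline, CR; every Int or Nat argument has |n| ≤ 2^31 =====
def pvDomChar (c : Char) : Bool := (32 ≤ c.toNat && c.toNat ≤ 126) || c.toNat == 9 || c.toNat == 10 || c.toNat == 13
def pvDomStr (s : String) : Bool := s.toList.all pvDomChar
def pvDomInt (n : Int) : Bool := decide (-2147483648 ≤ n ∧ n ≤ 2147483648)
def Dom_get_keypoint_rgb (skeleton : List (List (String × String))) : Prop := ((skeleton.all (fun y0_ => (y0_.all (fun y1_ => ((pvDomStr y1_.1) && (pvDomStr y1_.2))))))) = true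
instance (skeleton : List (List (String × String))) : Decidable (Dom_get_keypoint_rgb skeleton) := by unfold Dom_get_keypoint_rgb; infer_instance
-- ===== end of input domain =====

-- B replaces A's 21-suffix if/elif ladder by parse-and-compute: strip the trailing
-- digit, match the finger word before it, and compute the shade arithmetically.

-- ===== PORT A =====
-- literal transliteration of A: index loop over range(len(skeleton)), branch ladder, dict insert
def get_keypoint_rgb (skeleton : List (List (String × String))) : List (String × Int × Int × Int) :=
  let rgb_dict : PySem.Dict String (Int × Int × Int) :=
    (PySem.List.pyRange 0 (PySem.List.len skeleton) 1).foldl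
      (fun (d : PySem.Dict String (Int × Int × Int)) joint_id =>
        let joint := PySem.List.pyGetD skeleton joint_id []
        -- skeleton[joint_id]['name']: KeyError excluded by Pre_; total form via getD
        let joint_name := (PySem.Dict.mk joint).getD "name" ""
        if PySem.Str.endswith joint_name "thumb4" then d.insert joint_name (255, 0, 0)
        else if PySem.Str.endswith joint_name "thumb3" then d.insert joint_name (255, 51, 51)
        else if PySem.Str.endswith joint_name "thumb2" then d.insert joint_name (255, 102, 102)
        else if PySem.Str.endswith joint_name "thumb1" then d.insert joint_name (255, 153, 153)
        else if PySem.Str.endswith joint_name "thumb0" then d.insert joint_name (255, 204, 204)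
        else if PySem.Str.endswith joint_name "index4" then d.insert joint_name (0, 255, 0)
        else if PySem.Str.endswith joint_name "index3" then d.insert joint_name (51, 255, 51)
        else if PySem.Str.endswith joint_name "index2" then d.insert joint_name (102, 255, 102)
        else if PySem.Str.endswith joint_name "index1" then d.insert joint_name (153, 255, 153)
        else if PySem.Str.endswith joint_name "middle4" then d.insert joint_name (255, 128, 0)
        else if PySem.Str.endswith joint_name "middle3" then d.insert joint_name (255, 153, 51)
        else if PySem.Str.endswith joint_name "middle2" then d.insert joint_name (255, 178, 102)
        else if PySem.Str.endswith joint_name "middle1" then d.insert joint_name (255, 204, 153)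
        else if PySem.Str.endswith joint_name "ring4" then d.insert joint_name (0, 128, 255)
        else if PySem.Str.endswith joint_name "ring3" then d.insert joint_name (51, 153, 255)
        else if PySem.Str.endswith joint_name "ring2" then d.insert joint_name (102, 178, 255)
        else if PySem.Str.endswith joint_name "ring1" then d.insert joint_name (153, 204, 255)
        else if PySem.Str.endswith joint_name "pinky4" then d.insert joint_name (255, 0, 255)
        else if PySem.Str.endswith joint_name "pinky3" then d.insert joint_name (255, 51, 255)
        else if PySem.Str.endswith joint_name "pinky2" then d.insert joint_name (255, 102, 255)
        else if PySem.Str.endswith joint_name "pinky1" then d.insert joint_name (255, 153, 255)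
        else if PySem.Str.startswith joint_name "l" then d.insert joint_name (0, 0, 255)
        else if PySem.Str.startswith joint_name "r" then d.insert joint_name (255, 0, 0)
        else d.insert joint_name (230, 230, 0))
      PySem.Dict.empty
  rgb_dict.items

-- ===== PORT B =====
-- port of Source B's _suffix_color: parse trailing digit, find the finger word, compute the shade
def suffix_color (name : String) : Option (Int × Int × Int) :=
  match name.toList.getLast? with          -- guard `name and …`: name[-1] exists only on nonempty
  | none => none
  | some digit =>
    if '0' ≤ digit ∧ digit ≤ '4' then
      let t : Int := 4 - ((digit.toNat : Int) - 48)   -- int(name[-1]) of a decimal digit = code point - 48 (exact)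
      let stem := name.toList.dropLast                 -- name[:-1]
      match ["thumb", "index", "middle", "ring", "pinky"].find?
          (fun finger => PySem.Chars.endswith stem finger.toList && (finger == "thumb" || decide (t < 4))) with
      | some finger =>
        let s := 51 * t
        let g := 128 + 25 * t + PySem.Int.floordiv t 3
        some (if finger == "thumb" then (255, s, s)
              else if finger == "index" then (s, 255, s)
              else if finger == "middle" then (255, g, s)
              else if finger == "ring" then (s, g, 255)
              else (255, s, 255))
      | none => none
    else none

def get_keypoint_rgb_alt (skeleton : List (List (String × String))) : List (String × Int × Int × Int) :=
  (skeleton.foldl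
    (fun (d : PySem.Dict String (Int × Int × Int)) joint =>
      let name := (PySem.Dict.mk joint).getD "name" ""
      let color :=
        match suffix_color name with
        | some c => c
        | none =>
          if PySem.Str.startswith name "l" then (0, 0, 255)
          else if PySem.Str.startswith name "r" then (255, 0, 0)
          else (230, 230, 0)
      d.insert name color)
    PySem.Dict.empty).items

-- ===== PRECONDITION & SPEC =====
-- Pre_: every joint dict has a 'name' key; otherwise Python A raises KeyError.
def Pre_get_keypoint_rgb (skeleton : List (List (String × String))) : Prop :=
  ∀ joint ∈ skeleton, ((PySem.Dict.mk joint).get? "name").isSome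
instance (skeleton : List (List (String × String))) : Decidable (Pre_get_keypoint_rgb skeleton) := by
  unfold Pre_get_keypoint_rgb; infer_instance

def pvWitness_get_keypoint_rgb : (List (List (String × String))) :=
  [[("name", "r_thumb4")], [("name", "lwrist")], [("name", "palm")]]

def Spec_get_keypoint_rgb (skeleton : List (List (String × String))) (out : List (String × Int × Int × Int)) : Prop := out = get_keypoint_rgb_alt skeleton
instance (skeleton : List (List (String × String))) (out : List (String × Int × Int × Int)) : Decidable (Spec_get_keypoint_rgb skeleton out) := by unfold Spec_get_keypoint_rgb; infer_instance

-- ===== CLAIM (what is proved, stated in full; the proofs are below) =====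
def Claim_equal_get_keypoint_rgb : Prop := ∀ (skeleton : List (List (String × String))), Dom_get_keypoint_rgb skeleton → Pre_get_keypoint_rgb skeleton → Spec_get_keypoint_rgb skeleton (get_keypoint_rgb skeleton)

-- ===== LEMMAS AND PROOFS =====

-- A's loop body as a function of the fetched joint (proof helper; definitionally A's step)
def aStep (d : PySem.Dict String (Int × Int × Int)) (joint : List (String × String)) :
    PySem.Dict String (Int × Int × Int) :=
  let joint_name := (PySem.Dict.mk joint).getD "name" ""
  if PySem.Str.endswith joint_name "thumb4" then d.insert joint_name (255, 0, 0)
  else if PySem.Str.endswith joint_name "thumb3" then d.insert joint_name (255, 51, 51)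
  else if PySem.Str.endswith joint_name "thumb2" then d.insert joint_name (255, 102, 102)
  else if PySem.Str.endswith joint_name "thumb1" then d.insert joint_name (255, 153, 153)
  else if PySem.Str.endswith joint_name "thumb0" then d.insert joint_name (255, 204, 204)
  else if PySem.Str.endswith joint_name "index4" then d.insert joint_name (0, 255, 0)
  else if PySem.Str.endswith joint_name "index3" then d.insert joint_name (51, 255, 51)
  else if PySem.Str.endswith joint_name "index2" then d.insert joint_name (102, 255, 102)
  else if PySem.Str.endswith joint_name "index1" then d.insert joint_name (153, 255, 153)
  else if PySem.Str.endswith joint_name "middle4" then d.insert joint_name (255, 128, 0)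
  else if PySem.Str.endswith joint_name "middle3" then d.insert joint_name (255, 153, 51)
  else if PySem.Str.endswith joint_name "middle2" then d.insert joint_name (255, 178, 102)
  else if PySem.Str.endswith joint_name "middle1" then d.insert joint_name (255, 204, 153)
  else if PySem.Str.endswith joint_name "ring4" then d.insert joint_name (0, 128, 255)
  else if PySem.Str.endswith joint_name "ring3" then d.insert joint_name (51, 153, 255)
  else if PySem.Str.endswith joint_name "ring2" then d.insert joint_name (102, 178, 255)
  else if PySem.Str.endswith joint_name "ring1" then d.insert joint_name (153, 204, 255)
  else if PySem.Str.endswith joint_name "pinky4" then d.insert joint_name (255, 0, 255)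
  else if PySem.Str.endswith joint_name "pinky3" then d.insert joint_name (255, 51, 255)
  else if PySem.Str.endswith joint_name "pinky2" then d.insert joint_name (255, 102, 255)
  else if PySem.Str.endswith joint_name "pinky1" then d.insert joint_name (255, 153, 255)
  else if PySem.Str.startswith joint_name "l" then d.insert joint_name (0, 0, 255)
  else if PySem.Str.startswith joint_name "r" then d.insert joint_name (255, 0, 0)
  else d.insert joint_name (230, 230, 0)

-- B's per-name colour (proof helper; definitionally B's step body)
def bColor (name : String) : Int × Int × Int :=
  match suffix_color name with
  | some c => c
  | none =>
    if PySem.Str.startswith name "l" then (0, 0, 255)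
    else if PySem.Str.startswith name "r" then (255, 0, 0)
    else (230, 230, 0)

def aColor (name : String) : Int × Int × Int :=
  if PySem.Str.endswith name "thumb4" then (255, 0, 0)
  else if PySem.Str.endswith name "thumb3" then (255, 51, 51)
  else if PySem.Str.endswith name "thumb2" then (255, 102, 102)
  else if PySem.Str.endswith name "thumb1" then (255, 153, 153)
  else if PySem.Str.endswith name "thumb0" then (255, 204, 204)
  else if PySem.Str.endswith name "index4" then (0, 255, 0)
  else if PySem.Str.endswith name "index3" then (51, 255, 51)
  else if PySem.Str.endswith name "index2" then (102, 255, 102)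
  else if PySem.Str.endswith name "index1" then (153, 255, 153)
  else if PySem.Str.endswith name "middle4" then (255, 128, 0)
  else if PySem.Str.endswith name "middle3" then (255, 153, 51)
  else if PySem.Str.endswith name "middle2" then (255, 178, 102)
  else if PySem.Str.endswith name "middle1" then (255, 204, 153)
  else if PySem.Str.endswith name "ring4" then (0, 128, 255)
  else if PySem.Str.endswith name "ring3" then (51, 153, 255)
  else if PySem.Str.endswith name "ring2" then (102, 178, 255)
  else if PySem.Str.endswith name "ring1" then (153, 204, 255)
  else if PySem.Str.endswith name "pinky4" then (255, 0, 255)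
  else if PySem.Str.endswith name "pinky3" then (255, 51, 255)
  else if PySem.Str.endswith name "pinky2" then (255, 102, 255)
  else if PySem.Str.endswith name "pinky1" then (255, 153, 255)
  else if PySem.Str.startswith name "l" then (0, 0, 255)
  else if PySem.Str.startswith name "r" then (255, 0, 0)
  else (230, 230, 0)

theorem endswith_concat (l f : List Char) (d : Char) :
    PySem.Chars.endswith l (f ++ [d])
      = ((l.getLast? == some d) && PySem.Chars.endswith l.dropLast f) := by
  by_cases h : PySem.Chars.endswith l (f ++ [d]) = true
  · rw [h]
    obtain ⟨p, hp⟩ := (PySem.Chars.endswith_iff _ _).mp h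
    subst hp
    rw [show p ++ (f ++ [d]) = (p ++ f) ++ [d] by simp]
    simp [(PySem.Chars.endswith_iff _ _).mpr ⟨p, rfl⟩]
  · rw [Bool.eq_false_iff.mpr h, eq_comm, Bool.and_eq_false_iff]
    by_cases hd : l.getLast? = some d
    · right
      obtain ⟨ys, rfl⟩ := List.getLast?_eq_some_iff.mp hd
      apply Bool.eq_false_iff.mpr
      intro he
      obtain ⟨p, hp⟩ := (PySem.Chars.endswith_iff _ _).mp he
      apply h
      apply (PySem.Chars.endswith_iff _ _).mpr
      rw [List.dropLast_concat] at hp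
      exact ⟨p, by rw [← hp]; simp⟩
    · left; simp [hd]

theorem char_digit_cases (d : Char) (h : '0' ≤ d ∧ d ≤ '4') :
    d = '0' ∨ d = '1' ∨ d = '2' ∨ d = '3' ∨ d = '4' := by
  obtain ⟨h1, h2⟩ := h
  rw [Char.le_def] at h1 h2
  have n1 : 48 ≤ d.toNat := UInt32.le_iff_toNat_le.mp h1
  have n2 : d.toNat ≤ 52 := UInt32.le_iff_toNat_le.mp h2
  have hh : d.toNat = 48 ∨ d.toNat = 49 ∨ d.toNat = 50 ∨ d.toNat = 51 ∨ d.toNat = 52 := by omega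
  have key : ∀ c : Char, d.toNat = c.toNat → d = c := by
    intro c hc; exact Char.ext (UInt32.toNat_inj.mp hc)
  rcases hh with h | h | h | h | h
  · exact Or.inl (key '0' h)
  · exact Or.inr (Or.inl (key '1' h))
  · exact Or.inr (Or.inr (Or.inl (key '2' h)))
  · exact Or.inr (Or.inr (Or.inr (Or.inl (key '3' h))))
  · exact Or.inr (Or.inr (Or.inr (Or.inr (key '4' h))))

theorem color_eq (name : String) : aColor name = bColor name := by
  have E : ∀ (s t : String) (c : Char), s.toList = t.toList ++ [c] →
      PySem.Chars.endswith name.toList s.toList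
        = ((name.toList.getLast? == some c) && PySem.Chars.endswith name.toList.dropLast t.toList) :=
    fun s t c hs => hs ▸ endswith_concat name.toList t.toList c
  unfold aColor bColor suffix_color
  simp only [PySem.Str.endswith_eq]
  simp only [E "thumb4" "thumb" '4' rfl, E "thumb3" "thumb" '3' rfl, E "thumb2" "thumb" '2' rfl,
      E "thumb1" "thumb" '1' rfl, E "thumb0" "thumb" '0' rfl,
      E "index4" "index" '4' rfl, E "index3" "index" '3' rfl, E "index2" "index" '2' rfl,
      E "index1" "index" '1' rfl,
      E "middle4" "middle" '4' rfl, E "middle3" "middle" '3' rfl, E "middle2" "middle" '2' rfl,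
      E "middle1" "middle" '1' rfl,
      E "ring4" "ring" '4' rfl, E "ring3" "ring" '3' rfl, E "ring2" "ring" '2' rfl,
      E "ring1" "ring" '1' rfl,
      E "pinky4" "pinky" '4' rfl, E "pinky3" "pinky" '3' rfl, E "pinky2" "pinky" '2' rfl,
      E "pinky1" "pinky" '1' rfl]
  cases hl : name.toList.getLast? with
  | none => simp [hl]
  | some dd =>
    by_cases h04 : ('0' ≤ dd ∧ dd ≤ '4')
    · rcases char_digit_cases dd h04 with rfl | rfl | rfl | rfl | rfl
      · by_cases hT : PySem.Chars.endswith name.toList.dropLast (['t', 'h', 'u', 'm', 'b'] : List Char) = true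
        · simp [hl, hT, List.find?, PySem.Int.floordiv]
        · by_cases hI : PySem.Chars.endswith name.toList.dropLast (['i', 'n', 'd', 'e', 'x'] : List Char) = true
          · simp [hl, hT, hI, List.find?, PySem.Int.floordiv]
          · by_cases hM : PySem.Chars.endswith name.toList.dropLast (['m', 'i', 'd', 'd', 'l', 'e'] : List Char) = true
            · simp [hl, hT, hI, hM, List.find?, PySem.Int.floordiv]
            · by_cases hR : PySem.Chars.endswith name.toList.dropLast (['r', 'i', 'n', 'g'] : List Char) = true
              · simp [hl, hT, hI, hM, hR, List.find?, PySem.Int.floordiv]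
              · by_cases hP : PySem.Chars.endswith name.toList.dropLast (['p', 'i', 'n', 'k', 'y'] : List Char) = true
                · simp [hl, hT, hI, hM, hR, hP, List.find?, PySem.Int.floordiv]
                · simp [hl, hT, hI, hM, hR, hP, List.find?, PySem.Int.floordiv]
      · by_cases hT : PySem.Chars.endswith name.toList.dropLast (['t', 'h', 'u', 'm', 'b'] : List Char) = true
        · simp [hl, hT, List.find?, PySem.Int.floordiv]
        · by_cases hI : PySem.Chars.endswith name.toList.dropLast (['i', 'n', 'd', 'e', 'x'] : List Char) = true
          · simp [hl, hT, hI, List.find?, PySem.Int.floordiv]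
          · by_cases hM : PySem.Chars.endswith name.toList.dropLast (['m', 'i', 'd', 'd', 'l', 'e'] : List Char) = true
            · simp [hl, hT, hI, hM, List.find?, PySem.Int.floordiv]
            · by_cases hR : PySem.Chars.endswith name.toList.dropLast (['r', 'i', 'n', 'g'] : List Char) = true
              · simp [hl, hT, hI, hM, hR, List.find?, PySem.Int.floordiv]
              · by_cases hP : PySem.Chars.endswith name.toList.dropLast (['p', 'i', 'n', 'k', 'y'] : List Char) = true
                · simp [hl, hT, hI, hM, hR, hP, List.find?, PySem.Int.floordiv]
                · simp [hl, hT, hI, hM, hR, hP, List.find?, PySem.Int.floordiv]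
      · by_cases hT : PySem.Chars.endswith name.toList.dropLast (['t', 'h', 'u', 'm', 'b'] : List Char) = true
        · simp [hl, hT, List.find?, PySem.Int.floordiv]
        · by_cases hI : PySem.Chars.endswith name.toList.dropLast (['i', 'n', 'd', 'e', 'x'] : List Char) = true
          · simp [hl, hT, hI, List.find?, PySem.Int.floordiv]
          · by_cases hM : PySem.Chars.endswith name.toList.dropLast (['m', 'i', 'd', 'd', 'l', 'e'] : List Char) = true
            · simp [hl, hT, hI, hM, List.find?, PySem.Int.floordiv]
            · by_cases hR : PySem.Chars.endswith name.toList.dropLast (['r', 'i', 'n', 'g'] : List Char) = true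
              · simp [hl, hT, hI, hM, hR, List.find?, PySem.Int.floordiv]
              · by_cases hP : PySem.Chars.endswith name.toList.dropLast (['p', 'i', 'n', 'k', 'y'] : List Char) = true
                · simp [hl, hT, hI, hM, hR, hP, List.find?, PySem.Int.floordiv]
                · simp [hl, hT, hI, hM, hR, hP, List.find?, PySem.Int.floordiv]
      · by_cases hT : PySem.Chars.endswith name.toList.dropLast (['t', 'h', 'u', 'm', 'b'] : List Char) = true
        · simp [hl, hT, List.find?, PySem.Int.floordiv]
        · by_cases hI : PySem.Chars.endswith name.toList.dropLast (['i', 'n', 'd', 'e', 'x'] : List Char) = true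
          · simp [hl, hT, hI, List.find?, PySem.Int.floordiv]
          · by_cases hM : PySem.Chars.endswith name.toList.dropLast (['m', 'i', 'd', 'd', 'l', 'e'] : List Char) = true
            · simp [hl, hT, hI, hM, List.find?, PySem.Int.floordiv]
            · by_cases hR : PySem.Chars.endswith name.toList.dropLast (['r', 'i', 'n', 'g'] : List Char) = true
              · simp [hl, hT, hI, hM, hR, List.find?, PySem.Int.floordiv]
              · by_cases hP : PySem.Chars.endswith name.toList.dropLast (['p', 'i', 'n', 'k', 'y'] : List Char) = true
                · simp [hl, hT, hI, hM, hR, hP, List.find?, PySem.Int.floordiv]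
                · simp [hl, hT, hI, hM, hR, hP, List.find?, PySem.Int.floordiv]
      · by_cases hT : PySem.Chars.endswith name.toList.dropLast (['t', 'h', 'u', 'm', 'b'] : List Char) = true
        · simp [hl, hT, List.find?, PySem.Int.floordiv]
        · by_cases hI : PySem.Chars.endswith name.toList.dropLast (['i', 'n', 'd', 'e', 'x'] : List Char) = true
          · simp [hl, hT, hI, List.find?, PySem.Int.floordiv]
          · by_cases hM : PySem.Chars.endswith name.toList.dropLast (['m', 'i', 'd', 'd', 'l', 'e'] : List Char) = true
            · simp [hl, hT, hI, hM, List.find?, PySem.Int.floordiv]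
            · by_cases hR : PySem.Chars.endswith name.toList.dropLast (['r', 'i', 'n', 'g'] : List Char) = true
              · simp [hl, hT, hI, hM, hR, List.find?, PySem.Int.floordiv]
              · by_cases hP : PySem.Chars.endswith name.toList.dropLast (['p', 'i', 'n', 'k', 'y'] : List Char) = true
                · simp [hl, hT, hI, hM, hR, hP, List.find?, PySem.Int.floordiv]
                · simp [hl, hT, hI, hM, hR, hP, List.find?, PySem.Int.floordiv]
    · have d4 : (dd == '4') = false := by simp; rintro rfl; exact h04 ⟨by decide, by decide⟩
      have d3 : (dd == '3') = false := by simp; rintro rfl; exact h04 ⟨by decide, by decide⟩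
      have d2 : (dd == '2') = false := by simp; rintro rfl; exact h04 ⟨by decide, by decide⟩
      have d1 : (dd == '1') = false := by simp; rintro rfl; exact h04 ⟨by decide, by decide⟩
      have d0 : (dd == '0') = false := by simp; rintro rfl; exact h04 ⟨by decide, by decide⟩
      simp [hl, h04, d4, d3, d2, d1, d0]

theorem insert_if {c : Prop} [Decidable c] (d : PySem.Dict String (Int × Int × Int))
    (n : String) (a b : Int × Int × Int) :
    (if c then d.insert n a else d.insert n b) = d.insert n (if c then a else b) := by
  split_ifs <;> rfl

theorem ladder_eq (d : PySem.Dict String (Int × Int × Int)) (joint : List (String × String)) :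
    aStep d joint = d.insert ((PySem.Dict.mk joint).getD "name" "")
      (bColor ((PySem.Dict.mk joint).getD "name" "")) := by
  unfold aStep
  simp only [insert_if]
  exact congrArg _ (color_eq ((PySem.Dict.mk joint).getD "name" ""))

-- ===== VERDICT (by name: the statement is the Claim_ definition above) =====
theorem get_keypoint_rgb_spec : Claim_equal_get_keypoint_rgb := by
  intro skeleton _ _
  unfold Spec_get_keypoint_rgb get_keypoint_rgb get_keypoint_rgb_alt
  show ((PySem.List.pyRange 0 (PySem.List.len skeleton) 1).foldl
      (fun d i => aStep d (PySem.List.pyGetD skeleton i [])) PySem.Dict.empty).items = _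
  rw [PySem.List.foldl_pyRange_zero_pyGetD skeleton ([] : List (String × String)) aStep
      PySem.Dict.empty]
  have hf : aStep = (fun (d : PySem.Dict String (Int × Int × Int)) (joint : List (String × String)) =>
      let name := (PySem.Dict.mk joint).getD "name" ""
      d.insert name (bColor name)) :=
    funext fun d => funext fun joint => ladder_eq d joint
  rw [hf]
  rfl
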